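-- pv_equiv track=rewrite | github.com/nawhgnawg/Algo | Programmers/Zero_BeakJoon/2_터치 미션.py | bfs
-- ===== SOURCE A (Python) =====
-- from collections import deque
--
-- def bfs(n, arr):
--     dx = [0, 0, 1, -1]
--     dy = [1, -1, 0, 0]
--     q = deque()
--     dist = [[-1] * n for _ in range(n)]  # 아직 방문 안함 -> -1
--
--     for i in range(n):
--         for j in range(n):
--             if arr[i][j] == "P":
--                 q.append((i, j))
--                 dist[i][j] = 0
--
--     while q:
--         r, c = q.popleft()
--         for k in range(4):
--             nx = r + dx[k]
--             ny = c + dy[k]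
--             if 0 <= nx < n and 0 <= ny < n:
--                 if arr[nx][ny] != 'X':
--                     if dist[nx][ny] == -1:
--                         dist[nx][ny] = dist[r][c] + 1
--                         q.append((nx, ny))
--
--     max_num = -1
--     for i in range(n):
--         for j in range(n):
--             if arr[i][j] == 'O':
--                 if max_num < dist[i][j]:
--                     max_num = dist[i][j]
--     return max_num
-- ===== SOURCE B (Python) =====
-- def bfs(n, arr):
--     INF = n * n + 1
--     dist = [[0 if arr[i][j] == "P" else INF for j in range(n)] for i in range(n)]
--     for _ in range(n * n):
--         new = [[relax(n, arr, dist, i, j) for j in range(n)] for i in range(n)]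
--         if new == dist:
--             break
--         dist = new
--     ans = -1
--     for i in range(n):
--         for j in range(n):
--             if arr[i][j] == "O" and dist[i][j] < INF and ans < dist[i][j]:
--                 ans = dist[i][j]
--     return ans
--
--
-- def relax(n, arr, dist, i, j):
--     d = dist[i][j]
--     if arr[i][j] == "X" or arr[i][j] == "P":
--         return d
--     for (x, y) in ((i - 1, j), (i + 1, j), (i, j - 1), (i, j + 1)):
--         if 0 <= x < n and 0 <= y < n and dist[x][y] + 1 < d:
--             d = dist[x][y] + 1
--     return d
-- ===== Notes on version B (the rewrite author's own statement) =====
-- stated objective: alternative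
-- what changed: Replaces the queue-based multi-source BFS with a distance matrix and separate final scan by Bellman-Ford-style value iteration: repeated whole-grid min-plus relaxation sweeps (each cell takes min(self, neighbour+1)) until a fixpoint, with unreachable cells held at a finite INF sentinel instead of -1.
import Mathlib
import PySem

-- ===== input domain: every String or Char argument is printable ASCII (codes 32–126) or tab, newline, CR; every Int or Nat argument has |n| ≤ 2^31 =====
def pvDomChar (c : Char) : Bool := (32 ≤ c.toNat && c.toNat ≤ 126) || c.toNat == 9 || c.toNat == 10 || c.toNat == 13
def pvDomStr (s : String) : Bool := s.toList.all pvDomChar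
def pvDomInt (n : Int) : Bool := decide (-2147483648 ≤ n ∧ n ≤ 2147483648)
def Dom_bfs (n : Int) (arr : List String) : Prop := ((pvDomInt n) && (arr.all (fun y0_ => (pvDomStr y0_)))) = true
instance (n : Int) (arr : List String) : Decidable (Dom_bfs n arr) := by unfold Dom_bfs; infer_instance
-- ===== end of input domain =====

-- B replaces A's queue-based multi-source BFS (deque + per-cell distance matrix, then a
-- separate final max-scan) by Bellman-Ford-style value iteration: whole-grid min-plus
-- relaxation sweeps repeated to a fixpoint, unreachable cells held at a finite INF
-- sentinel (objective: alternative).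

-- shared primitive: the character arr[i][j] (both Pythons read the grid this way; exact on Pre_)
def cellC (arr : List String) (i j : Int) : Char :=
  match PySem.List.pyGet? arr i with
  | some s => (PySem.Str.pyGet? s j).getD '?'
  | none => '?'

-- dist[i][j] read/write; both Pythons only ever index dist with 0 ≤ i,j < n, where this is exact
def mget (d : List (List Int)) (i j : Int) : Int :=
  if 0 ≤ i ∧ 0 ≤ j then (d.getD i.toNat []).getD j.toNat (-1) else -1

def mset (d : List (List Int)) (i j : Int) (v : Int) : List (List Int) :=
  if 0 ≤ i ∧ 0 ≤ j then d.set i.toNat ((d.getD i.toNat []).set j.toNat v) else d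

-- ===== PORT A =====
def dxA : List Int := [0, 0, 1, -1]
def dyA : List Int := [1, -1, 0, 0]

-- one neighbour check of A's inner `for k in range(4)` body;
-- state = (dist, cells appended to the queue by the current pop)
def stepA (n : Int) (arr : List String) (r c a b : Int)
    (st : List (List Int) × List (Int × Int)) : List (List Int) × List (Int × Int) :=
  let nx := r + a
  let ny := c + b
  if 0 ≤ nx ∧ nx < n ∧ 0 ≤ ny ∧ ny < n then
    if cellC arr nx ny ≠ 'X' then
      if mget st.1 nx ny = -1 then
        (mset st.1 nx ny (mget st.1 r c + 1), st.2 ++ [(nx, ny)])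
      else st
    else st
  else st

-- the body of A's while-loop for one popped cell (r, c)
def procCellA (n : Int) (arr : List String) (r c : Int)
    (st : List (List Int) × List (Int × Int)) : List (List Int) × List (Int × Int) :=
  (List.range 4).foldl (fun st k => stepA n arr r c (dxA.getD k 0) (dyA.getD k 0) st) st

-- A's while-loop; fuel bounds the number of pops (n*n suffices: every enqueued cell
-- is a grid cell whose dist entry is set exactly once)
def loopA (n : Int) (arr : List String) : Nat → List (Int × Int) → List (List Int) → List (List Int)
  | _, [], dist => dist
  | 0, _, dist => dist
  | fuel + 1, rc :: rest, dist =>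
      let st := procCellA n arr rc.1 rc.2 (dist, [])
      loopA n arr fuel (rest ++ st.2) st.1

def bfs (n : Int) (arr : List String) : Int :=
  let dist0 : List (List Int) := List.replicate n.toNat (List.replicate n.toNat (-1))
  let seed := (PySem.List.pyRange 0 n 1).foldl (fun st i =>
      (PySem.List.pyRange 0 n 1).foldl (fun (st : List (Int × Int) × List (List Int)) j =>
        if cellC arr i j = 'P' then (st.1 ++ [(i, j)], mset st.2 i j 0) else st) st) ([], dist0)
  let dist := loopA n arr (n.toNat * n.toNat) seed.1 seed.2
  (PySem.List.pyRange 0 n 1).foldl (fun m i =>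
    (PySem.List.pyRange 0 n 1).foldl (fun m j =>
      if cellC arr i j = 'O' then (if m < mget dist i j then mget dist i j else m) else m) m) (-1)

-- ===== PORT B =====
-- the four neighbour coordinates B's relax step inspects, in B's order
def nbrsOf (i j : Int) : List (Int × Int) := [(i - 1, j), (i + 1, j), (i, j - 1), (i, j + 1)]

-- B's helper `relax`: min(dist[i][j], 1 + min of in-bounds neighbour distances)
def relaxB (n : Int) (arr : List String) (d : List (List Int)) (i j : Int) : Int :=
  if cellC arr i j = 'X' ∨ cellC arr i j = 'P' then mget d i j
  else (nbrsOf i j).foldl (fun b q =>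
    if 0 ≤ q.1 ∧ q.1 < n ∧ 0 ≤ q.2 ∧ q.2 < n ∧ mget d q.1 q.2 + 1 < b
    then mget d q.1 q.2 + 1 else b) (mget d i j)

-- one full relaxation sweep: `new = [[relax(...) for j in range(n)] for i in range(n)]`
def sweepB (n : Int) (arr : List String) (d : List (List Int)) : List (List Int) :=
  (PySem.List.pyRange 0 n 1).map (fun i =>
    (PySem.List.pyRange 0 n 1).map (fun j => relaxB n arr d i j))

-- B's `for _ in range(n*n)` loop with the `if new == dist: break` early exit
def jloopB (n : Int) (arr : List String) : Nat → List (List Int) → List (List Int)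
  | 0, d => d
  | fuel + 1, d =>
      let nd := sweepB n arr d
      if nd = d then d else jloopB n arr fuel nd

def bfs_alt (n : Int) (arr : List String) : Int :=
  let inf := n * n + 1
  let d0 := (PySem.List.pyRange 0 n 1).map (fun i =>
    (PySem.List.pyRange 0 n 1).map (fun j => if cellC arr i j = 'P' then 0 else inf))
  let df := jloopB n arr (n * n).toNat d0
  (PySem.List.pyRange 0 n 1).foldl (fun m i =>
    (PySem.List.pyRange 0 n 1).foldl (fun m j =>
      if cellC arr i j = 'O' ∧ mget df i j < inf ∧ m < mget df i j then mget df i j else m) m) (-1)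

-- ===== PRECONDITION & SPEC =====
-- Pre_: exactly the inputs where Python A returns (A indexes arr[i][j] for all 0 ≤ i,j < n;
-- with fewer than n rows, or a row among the first n shorter than n, it raises IndexError)
def Pre_bfs (n : Int) (arr : List String) : Prop :=
  n.toNat ≤ arr.length ∧ ∀ s ∈ arr.take n.toNat, n.toNat ≤ s.toList.length
instance (n : Int) (arr : List String) : Decidable (Pre_bfs n arr) := by
  unfold Pre_bfs; infer_instance

def pvWitness_bfs : Int × List String := (2, ["PO", "OX"])

def Spec_bfs (n : Int) (arr : List String) (out : Int) : Prop := out = bfs_alt n arr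
instance (n : Int) (arr : List String) (out : Int) : Decidable (Spec_bfs n arr out) := by unfold Spec_bfs; infer_instance

-- ===== CLAIM (what is proved, stated in full; the proofs are below) =====
def Claim_equal_bfs : Prop := ∀ (n : Int) (arr : List String), Dom_bfs n arr → Pre_bfs n arr → Spec_bfs n arr (bfs n arr)

-- ===== LEMMAS AND PROOFS =====

-- ---- the grid cell list ----
def inb (n : Int) (p : Int × Int) : Prop := 0 ≤ p.1 ∧ p.1 < n ∧ 0 ≤ p.2 ∧ p.2 < n

def cells (n : Int) : List (Int × Int) :=
  (PySem.List.pyRange 0 n 1).flatMap (fun i => (PySem.List.pyRange 0 n 1).map (fun j => (i, j)))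

theorem mem_cells (n : Int) (p : Int × Int) : p ∈ cells n ↔ inb n p := by
  obtain ⟨i, j⟩ := p
  simp only [cells, List.mem_flatMap, List.mem_map, PySem.List.mem_pyRange_one, inb, Prod.mk.injEq]
  constructor
  · rintro ⟨a, ha, b, hb, rfl, rfl⟩
    exact ⟨ha.1, ha.2, hb.1, hb.2⟩
  · rintro ⟨h1, h2, h3, h4⟩
    exact ⟨i, ⟨h1, h2⟩, j, ⟨h3, h4⟩, rfl, rfl⟩

theorem nodup_cells (n : Int) : (cells n).Nodup := by
  unfold cells
  rw [List.nodup_flatMap]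
  refine ⟨fun i _ => ?_, ?_⟩
  · exact (PySem.List.nodup_pyRange_one 0 n).map (fun x y h => congrArg Prod.snd h)
  · refine List.Pairwise.imp ?_ (PySem.List.pairwise_lt_pyRange_one 0 n)
    intro a b hab p hpa hpb
    simp only [List.mem_map] at hpa hpb
    obtain ⟨j1, _, rfl⟩ := hpa
    obtain ⟨j2, _, h⟩ := hpb
    have := congrArg Prod.fst h
    simp only at this
    omega

theorem length_cells (n : Int) : (cells n).length = n.toNat * n.toNat := by
  unfold cells
  rw [List.length_flatMap]
  have h1 : (PySem.List.pyRange 0 n 1).length = n.toNat := by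
    rw [PySem.List.length_pyRange_one]; simp
  calc ((PySem.List.pyRange 0 n 1).map
        (fun i => ((PySem.List.pyRange 0 n 1).map (fun j => (i, j))).length)).sum
      = ((PySem.List.pyRange 0 n 1).map (fun _ => n.toNat)).sum := by
        simp [List.length_map, h1]
    _ = n.toNat * n.toNat := by
        rw [List.map_const', List.sum_replicate, h1, smul_eq_mul]

-- ---- matrix lemmas ----
def shapeN (n : Int) (d : List (List Int)) : Prop :=
  d.length = n.toNat ∧ ∀ r ∈ d, r.length = n.toNat

theorem shapeN_mset {n : Int} {d : List (List Int)} (h : shapeN n d) (i j v : Int) :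
    shapeN n (mset d i j v) := by
  obtain ⟨hlen, hrow⟩ := h
  unfold mset
  split_ifs with hij
  · by_cases hi : i.toNat < d.length
    · constructor
      · rw [List.length_set]; exact hlen
      · intro r hr
        rcases List.mem_or_eq_of_mem_set hr with h' | rfl
        · exact hrow r h'
        · rw [List.length_set]
          have hmem : d.getD i.toNat [] ∈ d := by
            rw [List.getD_eq_getElem?_getD, List.getElem?_eq_getElem hi]
            exact List.getElem_mem hi
          exact hrow _ hmem
    · rw [List.set_eq_of_length_le (Nat.le_of_not_lt hi)]
      exact ⟨hlen, hrow⟩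
  · exact ⟨hlen, hrow⟩

theorem mget_mset {n : Int} {d : List (List Int)} (hsh : shapeN n d) {i j : Int}
    (hin : inb n (i, j)) (v : Int) (q : Int × Int) :
    mget (mset d i j v) q.1 q.2 = if q = (i, j) then v else mget d q.1 q.2 := by
  obtain ⟨hlen, hrow⟩ := hsh
  obtain ⟨a, b⟩ := q
  have hi0 : (0:Int) ≤ i := hin.1
  have hiltn : i < n := hin.2.1
  have hj0 : (0:Int) ≤ j := hin.2.2.1
  have hjltn : j < n := hin.2.2.2
  have h0 : (0:Int) ≤ i ∧ 0 ≤ j := ⟨hi0, hj0⟩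
  have hi : i.toNat < d.length := by omega
  have hrowmem : d[i.toNat]?.getD [] ∈ d := by
    rw [List.getElem?_eq_getElem hi]
    exact List.getElem_mem hi
  have hrlen : (d[i.toNat]?.getD []).length = n.toNat := hrow _ hrowmem
  have hj : j.toNat < (d[i.toNat]?.getD []).length := by omega
  simp only [mget, mset, if_pos h0, List.getD_eq_getElem?_getD]
  by_cases hq0 : 0 ≤ a ∧ 0 ≤ b
  · rw [if_pos hq0, if_pos hq0]
    by_cases hai : a.toNat = i.toNat
    · have hrownew : (d.set i.toNat ((d[i.toNat]?.getD []).set j.toNat v))[a.toNat]?.getD []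
          = (d[i.toNat]?.getD []).set j.toNat v := by
        rw [hai, List.getElem?_set_self hi]
        rfl
      rw [hrownew]
      by_cases hbj : b.toNat = j.toNat
      · have heq : (a, b) = (i, j) := by
          have h1 : a = i := by omega
          have h2 : b = j := by omega
          rw [h1, h2]
        rw [if_pos heq, hbj, List.getElem?_set_self hj]
        rfl
      · have hne : (a, b) ≠ (i, j) := by
          simp only [ne_eq, Prod.mk.injEq, not_and]
          intro h1 h2
          omega
        rw [if_neg hne, List.getElem?_set_ne (fun h => hbj h.symm)]
        have ha : a = i := by omega
        rw [ha]
    · have hne : (a, b) ≠ (i, j) := by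
        simp only [ne_eq, Prod.mk.injEq, not_and]
        intro h1 h2
        omega
      rw [if_neg hne, List.getElem?_set_ne (fun h => hai h.symm)]
  · have hne : (a, b) ≠ (i, j) := by
      simp only [ne_eq, Prod.mk.injEq, not_and]
      intro h1 h2
      omega
    rw [if_neg hne, if_neg hq0, if_neg hq0]

theorem mget_replicate (n : Int) (p : Int × Int) :
    mget (List.replicate n.toNat (List.replicate n.toNat (-1))) p.1 p.2 = -1 := by
  simp only [mget, List.getD_eq_getElem?_getD, List.getElem?_replicate]
  split_ifs <;> simp [List.getElem?_replicate]
  all_goals split_ifs <;> simp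

theorem shapeN_replicate (n : Int) :
    shapeN n (List.replicate n.toNat (List.replicate n.toNat (-1))) := by
  constructor
  · exact List.length_replicate
  · intro r hr
    rw [List.eq_of_mem_replicate hr]
    exact List.length_replicate

-- ---- counting lemma ----
theorem countP_sub {α : Type} [DecidableEq α] :
    ∀ (P l : List α) (f g : α → Bool), l.Nodup → P.Nodup → (∀ p ∈ P, p ∈ l) →
      (∀ p ∈ P, f p = true) → (∀ p ∈ P, g p = false) → (∀ p ∈ l, p ∉ P → g p = f p) →
      l.countP g + P.length = l.countP f := by
  intro P
  induction P with
  | nil =>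
    intro l f g hl _ _ _ _ hfg
    simp only [List.length_nil, Nat.add_zero]
    exact List.countP_congr (fun p hp => by rw [hfg p hp (List.not_mem_nil)])
  | cons q P' ih =>
    intro l f g hl hP hPl hfP hgP hfg
    have hq : q ∈ l := hPl q List.mem_cons_self
    have hperm := List.perm_cons_erase hq
    rw [hperm.countP_eq g, hperm.countP_eq f]
    simp only [List.countP_cons, hfP q List.mem_cons_self, hgP q List.mem_cons_self]
    have hl' : (l.erase q).Nodup := hl.erase q
    have hqP' : q ∉ P' := (List.nodup_cons.1 hP).1
    have key := ih (l.erase q) f g hl' (List.nodup_cons.1 hP).2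
      (fun p hp => (List.mem_erase_of_ne (fun (he : p = q) => hqP' (he ▸ hp))).mpr (hPl p (List.mem_cons_of_mem _ hp)))
      (fun p hp => hfP p (List.mem_cons_of_mem _ hp))
      (fun p hp => hgP p (List.mem_cons_of_mem _ hp))
      (fun p hp hnp => hfg p (List.mem_of_mem_erase hp)
        (fun hmem => by
          rcases List.mem_cons.1 hmem with rfl | h'
          · exact (hl.mem_erase_iff.1 hp).1 rfl
          · exact hnp h'))
    simp only [List.length_cons]
    simp at key ⊢
    omega

-- ---- accumulator-append shape ----
theorem foldl_accApp {σ γ ι : Type} (G : ι → σ × List γ → σ × List γ)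
    (hG : ∀ i s acc, G i (s, acc) = ((G i (s, [])).1, acc ++ (G i (s, [])).2)) :
    ∀ (l : List ι) (s : σ) (acc : List γ),
      l.foldl (fun st i => G i st) (s, acc) =
        ((l.foldl (fun st i => G i st) (s, [])).1, acc ++ (l.foldl (fun st i => G i st) (s, [])).2) := by
  intro l
  induction l with
  | nil => intro s acc; simp
  | cons i t ih =>
    intro s acc
    simp only [List.foldl_cons]
    rw [hG i s acc, ih]
    conv_rhs => rw [show G i (s, []) = ((G i (s, [])).1, (G i (s, [])).2) from rfl, ih]
    simp [List.append_assoc]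

theorem procCellA_acc (n : Int) (arr : List String) (r c : Int) (d : List (List Int))
    (acc : List (Int × Int)) :
    procCellA n arr r c (d, acc) =
      ((procCellA n arr r c (d, [])).1, acc ++ (procCellA n arr r c (d, [])).2) := by
  unfold procCellA
  exact foldl_accApp (fun k st => stepA n arr r c (dxA.getD k 0) (dyA.getD k 0) st)
    (fun i s acc2 => by simp only [stepA]; split_ifs <;> simp) (List.range 4) d acc

theorem chunk (n : Int) (arr : List String) :
    ∀ (f : List (Int × Int)) (m : Nat) (g : List (Int × Int)) (d : List (List Int)),
      loopA n arr (f.length + m) (f ++ g) d =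
        loopA n arr m (g ++ (f.foldl (fun st rc => procCellA n arr rc.1 rc.2 st) (d, [])).2)
          (f.foldl (fun st rc => procCellA n arr rc.1 rc.2 st) (d, [])).1 := by
  intro f
  induction f with
  | nil =>
    intro m g d
    simp
  | cons rc t ih =>
    intro m g d
    have hlen : (rc :: t).length + m = (t.length + m) + 1 := by
      simp only [List.length_cons]; omega
    rw [hlen]
    have hstep : loopA n arr ((t.length + m) + 1) (rc :: (t ++ g)) d =
        loopA n arr (t.length + m)
          ((t ++ g) ++ (procCellA n arr rc.1 rc.2 (d, [])).2)
          (procCellA n arr rc.1 rc.2 (d, [])).1 := rfl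
    rw [show ((rc :: t) ++ g) = rc :: (t ++ g) from rfl, hstep, List.append_assoc,
      ih m (g ++ (procCellA n arr rc.1 rc.2 (d, [])).2) (procCellA n arr rc.1 rc.2 (d, [])).1]
    have haccfold := foldl_accApp (fun rc st => procCellA n arr rc.1 rc.2 st)
      (fun rc s acc2 => procCellA_acc n arr rc.1 rc.2 s acc2) t
      (procCellA n arr rc.1 rc.2 (d, [])).1 (procCellA n arr rc.1 rc.2 (d, [])).2
    simp only [List.foldl_cons]
    rw [show (procCellA n arr rc.1 rc.2 (d, [])) =
      ((procCellA n arr rc.1 rc.2 (d, [])).1, (procCellA n arr rc.1 rc.2 (d, [])).2) from rfl,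
      haccfold, List.append_assoc]

theorem loopA_nil (n : Int) (arr : List String) (fuel : Nat) (d : List (List Int)) :
    loopA n arr fuel [] d = d := by
  cases fuel <;> rfl

-- ---- count of unvisited cells ----
def cneg (n : Int) (d : List (List Int)) : Nat :=
  List.countP (fun p => mget d p.1 p.2 == -1) (cells n)

-- ---- nested range fold = fold over cells ----
theorem nestedFold {β : Type} (n : Int) (F : β → Int → Int → β) (init : β) :
    (PySem.List.pyRange 0 n 1).foldl (fun st i =>
      (PySem.List.pyRange 0 n 1).foldl (fun st j => F st i j) st) init =
    (cells n).foldl (fun st p => F st p.1 p.2) init := by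
  rw [cells, List.foldl_flatMap]
  simp [List.foldl_map]

-- ---- reachability levels (the mathematical BFS spec both ports are proved against) ----
def dirs4 : List (Int × Int) := [(0, 1), (0, -1), (1, 0), (-1, 0)]

def adj (p q : Int × Int) : Prop := ∃ d ∈ dirs4, q = (p.1 + d.1, p.2 + d.2)

def reachR (n : Int) (arr : List String) : Nat → (Int × Int) → Bool
  | 0, p => decide (0 ≤ p.1 ∧ p.1 < n ∧ 0 ≤ p.2 ∧ p.2 < n) && (cellC arr p.1 p.2 == 'P')
  | k+1, p => reachR n arr k p ||
      (decide (0 ≤ p.1 ∧ p.1 < n ∧ 0 ≤ p.2 ∧ p.2 < n) && (cellC arr p.1 p.2 != 'X') &&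
        dirs4.any (fun d => reachR n arr k (p.1 + d.1, p.2 + d.2)))

theorem neg_mem_dirs4 {d : Int × Int} (h : d ∈ dirs4) : (-d.1, -d.2) ∈ dirs4 := by
  simp only [dirs4, List.mem_cons, List.not_mem_nil, or_false] at h ⊢
  rcases h with rfl | rfl | rfl | rfl <;> simp

theorem reach_step_iff (n : Int) (arr : List String) (k : Nat) (p : Int × Int) :
    reachR n arr (k+1) p = true ↔ reachR n arr k p = true ∨
      (inb n p ∧ cellC arr p.1 p.2 ≠ 'X' ∧ ∃ q, adj q p ∧ reachR n arr k q = true) := by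
  show (reachR n arr k p || _) = true ↔ _
  simp only [Bool.or_eq_true, Bool.and_eq_true, List.any_eq_true, decide_eq_true_eq,
    bne_iff_ne, ne_eq, inb]
  constructor
  · rintro (h | ⟨⟨hin, hX⟩, d, hd, hr⟩)
    · exact Or.inl h
    · refine Or.inr ⟨hin, hX, (p.1 + d.1, p.2 + d.2), ⟨(-d.1, -d.2), neg_mem_dirs4 hd, ?_⟩, hr⟩
      simp
  · rintro (h | ⟨hin, hX, q, ⟨d, hd, hq⟩, hr⟩)
    · exact Or.inl h
    · refine Or.inr ⟨⟨hin, hX⟩, (-d.1, -d.2), neg_mem_dirs4 hd, ?_⟩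
      have h1 : p.1 + -d.1 = q.1 := by rw [hq]; ring
      have h2 : p.2 + -d.2 = q.2 := by rw [hq]; ring
      rw [h1, h2]
      exact hr

theorem reach_zero_iff (n : Int) (arr : List String) (p : Int × Int) :
    reachR n arr 0 p = true ↔ inb n p ∧ cellC arr p.1 p.2 = 'P' := by
  show (decide (0 ≤ p.1 ∧ p.1 < n ∧ 0 ≤ p.2 ∧ p.2 < n) && _) = true ↔ _
  simp [inb]

theorem reach_mono {n : Int} {arr : List String} {k : Nat} {p : Int × Int}
    (h : reachR n arr k p = true) : reachR n arr (k+1) p = true := by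
  exact (reach_step_iff n arr k p).2 (Or.inl h)

theorem reach_le {n : Int} {arr : List String} {j k : Nat} (hjk : j ≤ k) {p : Int × Int}
    (h : reachR n arr j p = true) : reachR n arr k p = true := by
  induction k with
  | zero => have : j = 0 := by omega
            exact this ▸ h
  | succ m ih =>
    by_cases hj : j = m + 1
    · exact hj ▸ h
    · exact reach_mono (ih (by omega))

theorem reach_inb {n : Int} {arr : List String} {k : Nat} {p : Int × Int}
    (h : reachR n arr k p = true) : inb n p := by
  induction k with
  | zero => exact ((reach_zero_iff n arr p).1 h).1
  | succ m ih =>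
    rcases (reach_step_iff n arr m p).1 h with h' | h'
    · exact ih h'
    · exact h'.1

theorem reach_X_false {n : Int} {arr : List String} {p : Int × Int}
    (hX : cellC arr p.1 p.2 = 'X') (k : Nat) : reachR n arr k p = false := by
  induction k with
  | zero =>
    rw [← Bool.not_eq_true, reach_zero_iff]
    rintro ⟨-, hP⟩
    rw [hX] at hP
    exact absurd hP (by decide)
  | succ m ih =>
    rw [← Bool.not_eq_true, reach_step_iff]
    rintro (h | ⟨-, hne, -⟩)
    · rw [ih] at h
      exact absurd h (by decide)
    · exact hne hX

-- ---- a bounded linear search, used to define the BFS level of a cell ----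
def seek (pred : Nat → Bool) : Nat → Nat → Option Nat
  | _, 0 => none
  | s, fuel+1 => if pred s then some s else seek pred (s+1) fuel

theorem seek_some (pred : Nat → Bool) :
    ∀ (fuel s k : Nat), seek pred s fuel = some k →
      s ≤ k ∧ k < s + fuel ∧ pred k = true ∧ ∀ j, s ≤ j → j < k → pred j = false := by
  intro fuel
  induction fuel with
  | zero => intro s k h; exact absurd h (by simp [seek])
  | succ f ih =>
    intro s k h
    rw [seek] at h
    by_cases hp : pred s = true
    · rw [if_pos hp] at h
      injection h with h
      subst h
      exact ⟨le_refl _, by omega, hp, fun j h1 h2 => by omega⟩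
    · rw [if_neg hp] at h
      obtain ⟨h1, h2, h3, h4⟩ := ih (s+1) k h
      refine ⟨by omega, by omega, h3, fun j hj1 hj2 => ?_⟩
      by_cases hjs : j = s
      · subst hjs; exact Bool.not_eq_true _ ▸ hp
      · exact h4 j (by omega) hj2

theorem seek_finds (pred : Nat → Bool) :
    ∀ (fuel s k : Nat), s ≤ k → k < s + fuel → pred k = true →
      ∃ m, seek pred s fuel = some m ∧ m ≤ k := by
  intro fuel
  induction fuel with
  | zero => intro s k h1 h2; omega
  | succ f ih =>
    intro s k h1 h2 h3
    rw [seek]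
    by_cases hp : pred s = true
    · exact ⟨s, by rw [if_pos hp], h1⟩
    · rw [if_neg hp]
      have hks : k ≠ s := fun he => hp (he ▸ h3)
      exact ih (s+1) k (by omega) (by omega) h3

def Ncap (n : Int) : Nat := n.toNat * n.toNat

def lvlo (n : Int) (arr : List String) (p : Int × Int) : Option Nat :=
  seek (fun k => reachR n arr k p) 0 (Ncap n + 1)

def lvlI (n : Int) (arr : List String) (p : Int × Int) : Int :=
  (lvlo n arr p).elim (-1) (fun k => (k : Int))

theorem lvl_cases (n : Int) (arr : List String) (p : Int × Int) :
    lvlI n arr p = -1 ∨ (0 ≤ lvlI n arr p ∧ lvlI n arr p ≤ (Ncap n : Int)) := by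
  unfold lvlI lvlo
  cases h : seek (fun k => reachR n arr k p) 0 (Ncap n + 1) with
  | none => exact Or.inl rfl
  | some k =>
    obtain ⟨-, h2, -, -⟩ := seek_some _ _ _ _ h
    refine Or.inr ?_
    simp only [Option.elim]
    constructor
    · positivity
    · simp only [Nat.cast_le]
      omega

theorem lvl_reach_self {n : Int} {arr : List String} {p : Int × Int}
    (h : 0 ≤ lvlI n arr p) :
    reachR n arr (lvlI n arr p).toNat p = true ∧
      ∀ j, j < (lvlI n arr p).toNat → reachR n arr j p = false := by
  unfold lvlI lvlo at *
  cases hs : seek (fun k => reachR n arr k p) 0 (Ncap n + 1) with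
  | none => rw [hs] at h; exact absurd h (by norm_num)
  | some k =>
    obtain ⟨-, -, h3, h4⟩ := seek_some _ _ _ _ hs
    simp only [Option.elim, Int.toNat_natCast]
    exact ⟨h3, fun j hj => h4 j (by omega) hj⟩

theorem lvl_inb {n : Int} {arr : List String} {p : Int × Int}
    (h : 0 ≤ lvlI n arr p) : inb n p :=
  reach_inb (lvl_reach_self h).1

theorem lvl_le_of_reach {n : Int} {arr : List String} {p : Int × Int} {k : Nat}
    (h : reachR n arr k p = true) (hk : k ≤ Ncap n) :
    0 ≤ lvlI n arr p ∧ lvlI n arr p ≤ (k : Int) := by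
  obtain ⟨m, hm, hmk⟩ := seek_finds (fun k => reachR n arr k p) (Ncap n + 1) 0 k
    (by omega) (by omega) h
  unfold lvlI lvlo
  rw [hm]
  simp
  omega

theorem lvl_zero_iff (n : Int) (arr : List String) (p : Int × Int) :
    lvlI n arr p = 0 ↔ inb n p ∧ cellC arr p.1 p.2 = 'P' := by
  constructor
  · intro h
    have := (lvl_reach_self (by omega : 0 ≤ lvlI n arr p)).1
    rw [h] at this
    exact (reach_zero_iff n arr p).1 this
  · intro h
    have hr : reachR n arr 0 p = true := (reach_zero_iff n arr p).2 h
    have := lvl_le_of_reach hr (by omega)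
    omega

theorem lvl_X {n : Int} {arr : List String} {p : Int × Int}
    (hX : cellC arr p.1 p.2 = 'X') : lvlI n arr p = -1 := by
  rcases lvl_cases n arr p with h | ⟨h1, -⟩
  · exact h
  · have := (lvl_reach_self h1).1
    rw [reach_X_false hX] at this
    exact absurd this (by decide)

theorem lvl_succ_backward {n : Int} {arr : List String} {p : Int × Int} {k : Nat}
    (h : lvlI n arr p = (k : Int) + 1) :
    inb n p ∧ cellC arr p.1 p.2 ≠ 'X' ∧ ∃ q, adj q p ∧ lvlI n arr q = (k : Int) := by
  have h0 : 0 ≤ lvlI n arr p := by omega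
  obtain ⟨hr, hmin⟩ := lvl_reach_self h0
  have htn : (lvlI n arr p).toNat = k + 1 := by omega
  rw [htn] at hr hmin
  have hnk : reachR n arr k p = false := hmin k (by omega)
  rcases (reach_step_iff n arr k p).1 hr with h' | ⟨hin, hX, q, hadj, hq⟩
  · rw [hnk] at h'; exact absurd h' (by decide)
  · refine ⟨hin, hX, q, hadj, ?_⟩
    have hcap : (k : Int) + 1 ≤ (Ncap n : Int) := by
      rcases lvl_cases n arr p with hc | ⟨-, hc⟩
      · omega
      · omega
    have hqle := lvl_le_of_reach hq (by omega)
    -- q cannot have a smaller level, else p would be reachable at level k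
    rcases lt_or_ge (lvlI n arr q) (k : Int) with hlt | hge
    · exfalso
      have hq0 : 0 ≤ lvlI n arr q := hqle.1
      obtain ⟨hrq, -⟩ := lvl_reach_self hq0
      have hk1 : 1 ≤ k := by omega
      have hrq' : reachR n arr (k - 1) q = true :=
        reach_le (by omega) hrq
      have : reachR n arr ((k-1)+1) p = true :=
        (reach_step_iff n arr (k-1) p).2 (Or.inr ⟨hin, hX, q, hadj, hrq'⟩)
      rw [show k - 1 + 1 = k by omega] at this
      rw [hnk] at this
      exact absurd this (by decide)
    · omega

theorem lvl_adj_bound {n : Int} {arr : List String} {p q : Int × Int}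
    (hadj : adj q p) (hin : inb n p) (hX : cellC arr p.1 p.2 ≠ 'X')
    (hq : 0 ≤ lvlI n arr q) :
    lvlI n arr p ≤ lvlI n arr q + 1 ∨ (Ncap n : Int) ≤ lvlI n arr q := by
  rcases le_or_gt ((Ncap n : Int)) (lvlI n arr q) with hc | hc
  · exact Or.inr hc
  · left
    obtain ⟨hrq, -⟩ := lvl_reach_self hq
    have hrp : reachR n arr ((lvlI n arr q).toNat + 1) p = true :=
      (reach_step_iff n arr _ p).2 (Or.inr ⟨hin, hX, q, hadj, hrq⟩)
    have := lvl_le_of_reach hrp (by omega)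
    omega

theorem lvl_stable {n : Int} {arr : List String} (L : Nat)
    (h : ∀ q, lvlI n arr q ≠ (L : Int)) : ∀ p, lvlI n arr p < (L : Int) := by
  have key : ∀ j p, lvlI n arr p ≠ ((L + j : Nat) : Int) := by
    intro j
    induction j with
    | zero => intro p; exact_mod_cast h p
    | succ m ih =>
      intro p hp
      have hp' : lvlI n arr p = ((L + m : Nat) : Int) + 1 := by push_cast at hp ⊢; omega
      obtain ⟨-, -, q, -, hq⟩ := lvl_succ_backward hp'
      exact ih q hq
  intro p
  by_contra hge
  push Not at hge
  have h0 : 0 ≤ lvlI n arr p := by omega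
  have : lvlI n arr p = ((L + ((lvlI n arr p).toNat - L) : Nat) : Int) := by
    push_cast; omega
  exact key _ p this


-- ---- lvlI is at least -1 ----
theorem lvl_ge_neg (n : Int) (arr : List String) (p : Int × Int) : -1 ≤ lvlI n arr p := by
  rcases lvl_cases n arr p with h | ⟨h, -⟩ <;> omega

-- ---- A-side simulation: one neighbour check ----
theorem stepA_sim {n : Int} {arr : List String} {level : Nat} {d : List (List Int)}
    {P : List (Int × Int)} {rc : Int × Int} {a b : Int}
    (hd4 : (a, b) ∈ dirs4) (hsh : shapeN n d) (hnd : P.Nodup)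
    (H3 : ∀ p, mget d p.1 p.2 = if p ∈ P then (level:Int)+1
        else if 0 ≤ lvlI n arr p ∧ lvlI n arr p ≤ (level:Int) then lvlI n arr p else -1)
    (H4 : ∀ p ∈ P, lvlI n arr p = (level:Int)+1)
    (hcap : level + 1 ≤ Ncap n)
    (hrc : lvlI n arr rc = (level:Int)) :
    shapeN n (stepA n arr rc.1 rc.2 a b (d, P)).1 ∧
    (stepA n arr rc.1 rc.2 a b (d, P)).2.Nodup ∧
    (∀ p, mget (stepA n arr rc.1 rc.2 a b (d, P)).1 p.1 p.2 =
        if p ∈ (stepA n arr rc.1 rc.2 a b (d, P)).2 then (level:Int)+1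
        else if 0 ≤ lvlI n arr p ∧ lvlI n arr p ≤ (level:Int) then lvlI n arr p else -1) ∧
    (∀ p ∈ (stepA n arr rc.1 rc.2 a b (d, P)).2, lvlI n arr p = (level:Int)+1) ∧
    (∀ p ∈ P, p ∈ (stepA n arr rc.1 rc.2 a b (d, P)).2) ∧
    (lvlI n arr (rc.1 + a, rc.2 + b) = (level:Int)+1 →
      (rc.1 + a, rc.2 + b) ∈ (stepA n arr rc.1 rc.2 a b (d, P)).2) := by
  have hrcP : rc ∉ P := by
    intro h
    have := H4 rc h
    omega
  have hmrc : mget d rc.1 rc.2 = (level:Int) := by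
    have h := H3 rc
    rw [if_neg hrcP, if_pos ⟨by omega, by omega⟩] at h
    omega
  simp only [stepA]
  split_ifs with h1 h2 h3
  · -- push branch
    have hinb : inb n (rc.1 + a, rc.2 + b) := by
      simp only [inb]
      exact h1
    have hqP : (rc.1 + a, rc.2 + b) ∉ P := by
      intro h
      have := H3 (rc.1 + a, rc.2 + b)
      rw [if_pos h] at this
      simp only at this h3
      omega
    have hnotle : ¬ (0 ≤ lvlI n arr (rc.1 + a, rc.2 + b) ∧
        lvlI n arr (rc.1 + a, rc.2 + b) ≤ (level:Int)) := by
      intro hc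
      have h := H3 (rc.1 + a, rc.2 + b)
      rw [if_neg hqP, if_pos hc] at h
      simp only at h h3
      omega
    have hrcreach : reachR n arr level rc = true := by
      have h0 : 0 ≤ lvlI n arr rc := by omega
      have := (lvl_reach_self h0).1
      rwa [show (lvlI n arr rc).toNat = level by omega] at this
    have hreach : reachR n arr (level+1) (rc.1 + a, rc.2 + b) = true :=
      (reach_step_iff n arr level (rc.1 + a, rc.2 + b)).2
        (Or.inr ⟨hinb, h2, rc, ⟨(a, b), hd4, rfl⟩, hrcreach⟩)
    have hlq := lvl_le_of_reach hreach hcap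
    have hlq' : lvlI n arr (rc.1 + a, rc.2 + b) = (level:Int)+1 := by
      push_cast at hlq
      omega
    have hval : mget d rc.1 rc.2 + 1 = (level:Int)+1 := by omega
    refine ⟨shapeN_mset hsh _ _ _, ?_, ?_, ?_, ?_, ?_⟩
    · exact List.Nodup.append hnd (List.nodup_singleton _)
        (by intro x hx hx2; rw [List.mem_singleton] at hx2; subst hx2; exact hqP hx)
    · intro p
      rw [mget_mset hsh hinb _ p]
      by_cases hpq : p = (rc.1 + a, rc.2 + b)
      · rw [if_pos hpq, if_pos (by rw [hpq]; exact List.mem_append_right _ (List.mem_singleton.2 rfl))]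
        exact hval
      · rw [if_neg hpq]
        have hmm : (p ∈ P ++ [(rc.1 + a, rc.2 + b)]) ↔ p ∈ P := by
          rw [List.mem_append, List.mem_singleton]
          exact ⟨fun h => h.elim id (fun h' => absurd h' hpq), Or.inl⟩
        rw [H3 p]
        by_cases hp : p ∈ P
        · rw [if_pos hp, if_pos (hmm.2 hp)]
        · rw [if_neg hp, if_neg (fun h => hp (hmm.1 h))]
    · intro p hp
      rw [List.mem_append, List.mem_singleton] at hp
      rcases hp with hp | rfl
      · exact H4 p hp
      · exact hlq'
    · intro p hp
      exact List.mem_append_left _ hp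
    · intro _
      exact List.mem_append_right _ (List.mem_singleton.2 rfl)
  · -- already-visited branch
    refine ⟨hsh, hnd, H3, H4, fun p hp => hp, ?_⟩
    intro hl
    by_cases hp : (rc.1 + a, rc.2 + b) ∈ P
    · exact hp
    · exfalso
      have h := H3 (rc.1 + a, rc.2 + b)
      rw [if_neg hp] at h
      have hguard : ¬ (0 ≤ lvlI n arr (rc.1 + a, rc.2 + b) ∧
          lvlI n arr (rc.1 + a, rc.2 + b) ≤ (level:Int)) := by
        intro hc
        omega
      rw [if_neg hguard] at h
      exact h3 h
  · -- wall branch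
    refine ⟨hsh, hnd, H3, H4, fun p hp => hp, ?_⟩
    intro hl
    rw [not_not] at h2
    have := lvl_X (n := n) (arr := arr) (p := (rc.1 + a, rc.2 + b)) h2
    omega
  · -- out-of-bounds branch
    refine ⟨hsh, hnd, H3, H4, fun p hp => hp, ?_⟩
    intro hl
    have := lvl_inb (n := n) (arr := arr) (p := (rc.1 + a, rc.2 + b)) (by omega)
    simp only [inb] at this
    exact absurd this h1

-- ---- A-side simulation: one popped cell (its four neighbour checks) ----
theorem procCellA_sim {n : Int} {arr : List String} {level : Nat} {d : List (List Int)}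
    {P : List (Int × Int)} {rc : Int × Int}
    (hsh : shapeN n d) (hnd : P.Nodup)
    (H3 : ∀ p, mget d p.1 p.2 = if p ∈ P then (level:Int)+1
        else if 0 ≤ lvlI n arr p ∧ lvlI n arr p ≤ (level:Int) then lvlI n arr p else -1)
    (H4 : ∀ p ∈ P, lvlI n arr p = (level:Int)+1)
    (hcap : level + 1 ≤ Ncap n)
    (hrc : lvlI n arr rc = (level:Int)) :
    shapeN n (procCellA n arr rc.1 rc.2 (d, P)).1 ∧
    (procCellA n arr rc.1 rc.2 (d, P)).2.Nodup ∧
    (∀ p, mget (procCellA n arr rc.1 rc.2 (d, P)).1 p.1 p.2 =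
        if p ∈ (procCellA n arr rc.1 rc.2 (d, P)).2 then (level:Int)+1
        else if 0 ≤ lvlI n arr p ∧ lvlI n arr p ≤ (level:Int) then lvlI n arr p else -1) ∧
    (∀ p ∈ (procCellA n arr rc.1 rc.2 (d, P)).2, lvlI n arr p = (level:Int)+1) ∧
    (∀ p ∈ P, p ∈ (procCellA n arr rc.1 rc.2 (d, P)).2) ∧
    (∀ q, adj rc q → lvlI n arr q = (level:Int)+1 → q ∈ (procCellA n arr rc.1 rc.2 (d, P)).2) := by
  have hunf : procCellA n arr rc.1 rc.2 (d, P) =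
      stepA n arr rc.1 rc.2 (-1) 0 (stepA n arr rc.1 rc.2 1 0
        (stepA n arr rc.1 rc.2 0 (-1) (stepA n arr rc.1 rc.2 0 1 (d, P)))) := rfl
  obtain ⟨a1, a2, a3, a4, a5, a6⟩ := stepA_sim (a := 0) (b := 1)
    (by simp [dirs4]) hsh hnd H3 H4 hcap hrc
  obtain ⟨b1, b2, b3, b4, b5, b6⟩ := stepA_sim (a := 0) (b := -1)
    (by simp [dirs4]) a1 a2 a3 a4 hcap hrc
  obtain ⟨c1, c2, c3, c4, c5, c6⟩ := stepA_sim (a := 1) (b := 0)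
    (by simp [dirs4]) b1 b2 b3 b4 hcap hrc
  obtain ⟨d1, d2, d3, d4, d5, d6⟩ := stepA_sim (a := -1) (b := 0)
    (by simp [dirs4]) c1 c2 c3 c4 hcap hrc
  rw [hunf]
  refine ⟨d1, d2, d3, d4, fun p hp => d5 p (c5 p (b5 p (a5 p hp))), ?_⟩
  rintro q ⟨dd, hdd, rfl⟩ hl
  simp only [dirs4, List.mem_cons, List.not_mem_nil, or_false] at hdd
  rcases hdd with rfl | rfl | rfl | rfl
  · exact d5 _ (c5 _ (b5 _ (a6 hl)))
  · exact d5 _ (c5 _ (b6 hl))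
  · exact d5 _ (c6 hl)
  · exact d6 hl

-- ---- A-side simulation: one whole frontier ----
theorem levelFold_sim {n : Int} {arr : List String} {level : Nat} :
    ∀ (f : List (Int × Int)) (d : List (List Int)) (P : List (Int × Int)),
      shapeN n d → P.Nodup →
      (∀ p, mget d p.1 p.2 = if p ∈ P then (level:Int)+1
          else if 0 ≤ lvlI n arr p ∧ lvlI n arr p ≤ (level:Int) then lvlI n arr p else -1) →
      (∀ p ∈ P, lvlI n arr p = (level:Int)+1) →
      level + 1 ≤ Ncap n →
      (∀ x ∈ f, lvlI n arr x = (level:Int)) →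
      shapeN n (f.foldl (fun st rc => procCellA n arr rc.1 rc.2 st) (d, P)).1 ∧
      (f.foldl (fun st rc => procCellA n arr rc.1 rc.2 st) (d, P)).2.Nodup ∧
      (∀ p, mget (f.foldl (fun st rc => procCellA n arr rc.1 rc.2 st) (d, P)).1 p.1 p.2 =
          if p ∈ (f.foldl (fun st rc => procCellA n arr rc.1 rc.2 st) (d, P)).2 then (level:Int)+1
          else if 0 ≤ lvlI n arr p ∧ lvlI n arr p ≤ (level:Int) then lvlI n arr p else -1) ∧
      (∀ p ∈ (f.foldl (fun st rc => procCellA n arr rc.1 rc.2 st) (d, P)).2,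
          lvlI n arr p = (level:Int)+1) ∧
      (∀ p ∈ P, p ∈ (f.foldl (fun st rc => procCellA n arr rc.1 rc.2 st) (d, P)).2) ∧
      (∀ q, lvlI n arr q = (level:Int)+1 → (∃ x ∈ f, adj x q) →
          q ∈ (f.foldl (fun st rc => procCellA n arr rc.1 rc.2 st) (d, P)).2) := by
  intro f
  induction f with
  | nil =>
    intro d P hsh hnd H3 H4 _ _
    exact ⟨hsh, hnd, H3, H4, fun p hp => hp, fun q _ hex => absurd hex (by simp)⟩
  | cons rc t ih =>
    intro d P hsh hnd H3 H4 hcap hf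
    obtain ⟨p1, p2, p3, p4, p5, p6⟩ :=
      procCellA_sim hsh hnd H3 H4 hcap (hf rc List.mem_cons_self)
    simp only [List.foldl_cons]
    obtain ⟨r1, r2, r3, r4, r5, r6⟩ :=
      ih (procCellA n arr rc.1 rc.2 (d, P)).1 (procCellA n arr rc.1 rc.2 (d, P)).2
        p1 p2 p3 p4 hcap (fun x hx => hf x (List.mem_cons_of_mem _ hx))
    refine ⟨r1, r2, r3, r4, fun p hp => r5 p (p5 p hp), ?_⟩
    rintro q hl ⟨x, hx, hadj⟩
    rcases List.mem_cons.1 hx with rfl | hx'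
    · exact r5 q (p6 q hadj hl)
    · exact r6 q hl ⟨x, hx', hadj⟩


-- ---- A-side simulation: the whole queue loop computes the level of every cell ----
theorem loopSim {n : Int} {arr : List String} :
    ∀ (fuelA : Nat) (level : Nat) (d : List (List Int)) (f : List (Int × Int)),
      shapeN n d →
      (∀ p, mget d p.1 p.2 =
          if 0 ≤ lvlI n arr p ∧ lvlI n arr p ≤ (level:Int) then lvlI n arr p else -1) →
      (∀ p, p ∈ f ↔ lvlI n arr p = (level:Int)) →
      f.Nodup →
      f.length + cneg n d ≤ fuelA →
      (f ≠ [] → level + 1 + cneg n d ≤ Ncap n) →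
      ∀ p, mget (loopA n arr fuelA f d) p.1 p.2 = lvlI n arr p := by
  intro fuelA
  induction fuelA using Nat.strong_induction_on with
  | _ fuelA ih =>
    intro level d f hsh H3 hmem hnd hfuel hcnt p
    cases f with
    | nil =>
      rw [loopA_nil]
      have hst : ∀ q, lvlI n arr q < (level:Int) :=
        lvl_stable level (fun q hq => by rw [← hmem q] at hq; exact (List.not_mem_nil) hq)
      rw [H3 p]
      have h1 := hst p
      have h2 := lvl_ge_neg n arr p
      split_ifs with h
      · rfl
      · omega
    | cons rc t =>
      have hne : (rc :: t) ≠ [] := by simp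
      have hcap : level + 1 ≤ Ncap n := by have := hcnt hne; omega
      have H3P : ∀ q, mget d q.1 q.2 = if q ∈ ([] : List (Int × Int)) then (level:Int)+1
          else if 0 ≤ lvlI n arr q ∧ lvlI n arr q ≤ (level:Int) then lvlI n arr q else -1 := by
        intro q
        rw [H3 q]
        rw [if_neg (List.not_mem_nil)]
      obtain ⟨s1, s2, s3, s4, -, s6⟩ := levelFold_sim (rc :: t) d []
        hsh List.nodup_nil H3P (fun q hq => absurd hq List.not_mem_nil) hcap
        (fun x hx => (hmem x).1 hx)
      set FA := ((rc :: t).foldl (fun st rc => procCellA n arr rc.1 rc.2 st) (d, [])) with hFA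
      have hmem' : ∀ q, q ∈ FA.2 ↔ lvlI n arr q = (level:Int)+1 := by
        intro q
        constructor
        · exact s4 q
        · intro hq
          obtain ⟨-, -, x, hadj, hx⟩ := lvl_succ_backward (k := level) hq
          exact s6 q hq ⟨x, (hmem x).2 hx, hadj⟩
      -- cells pushed this level were unvisited before and are visited now
      have hsub : ∀ q ∈ FA.2, q ∈ cells n := by
        intro q hq
        have := s4 q hq
        exact (mem_cells n q).2 (lvl_inb (n := n) (arr := arr) (p := q) (by omega))
      have hcneg : cneg n FA.1 + FA.2.length = cneg n d := by
        refine countP_sub FA.2 (cells n) (fun q => mget d q.1 q.2 == -1)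
          (fun q => mget FA.1 q.1 q.2 == -1) (nodup_cells n) s2 hsub ?_ ?_ ?_
        · intro q hq
          have hl := s4 q hq
          have h := H3 q
          have hguard : ¬ (0 ≤ lvlI n arr q ∧ lvlI n arr q ≤ (level:Int)) := by omega
          rw [if_neg hguard] at h
          simp [h]
        · intro q hq
          have h := s3 q
          rw [if_pos hq] at h
          simp only [beq_eq_false_iff_ne, ne_eq, h]
          omega
        · intro q _ hq
          have h := s3 q
          rw [if_neg hq] at h
          show (mget FA.1 q.1 q.2 == -1) = (mget d q.1 q.2 == -1)
          rw [h, H3 q]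
      have H3' : ∀ q, mget FA.1 q.1 q.2 =
          if 0 ≤ lvlI n arr q ∧ lvlI n arr q ≤ ((level+1 : Nat):Int) then lvlI n arr q else -1 := by
        intro q
        have h := s3 q
        push_cast
        by_cases hq : q ∈ FA.2
        · rw [if_pos hq] at h
          have hl := (hmem' q).1 hq
          rw [h, hl, if_pos (by omega)]
        · rw [if_neg hq] at h
          have hnl : lvlI n arr q ≠ (level:Int)+1 := fun hc => hq ((hmem' q).2 hc)
          rw [h]
          split_ifs with h1 h2 h2
          · rfl
          · omega
          · omega
          · rfl
      have hlen1 : 1 ≤ (rc :: t).length := by simp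
      have hflen : (rc :: t).length ≤ fuelA := by omega
      have hchunk : loopA n arr fuelA (rc :: t) d =
          loopA n arr (fuelA - (rc :: t).length) FA.2 FA.1 := by
        conv_lhs => rw [show fuelA = (rc :: t).length + (fuelA - (rc :: t).length) by omega]
        have := chunk n arr (rc :: t) (fuelA - (rc :: t).length) [] d
        simpa using this
      rw [hchunk]
      refine ih (fuelA - (rc :: t).length) (by omega) (level + 1) FA.1 FA.2 s1 H3' ?_ s2 ?_ ?_ p
      · intro q
        rw [hmem' q]
        push_cast
        constructor <;> (intro h; omega)
      · omega
      · intro hne'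
        have hpos : 1 ≤ FA.2.length := List.length_pos_of_ne_nil hne'
        have := hcnt hne
        omega

-- ---- seeding: the initial scan for 'P' cells ----
theorem seedFold {n : Int} {arr : List String} :
    ∀ (l : List (Int × Int)) (q : List (Int × Int)) (d : List (List Int)),
      shapeN n d → q.Nodup → l.Nodup → (∀ p ∈ l, inb n p ∧ p ∉ q) →
      (∀ p, mget d p.1 p.2 = if p ∈ q then 0 else -1) →
      shapeN n (l.foldl (fun st p => if cellC arr p.1 p.2 = 'P'
          then (st.1 ++ [p], mset st.2 p.1 p.2 0) else st) (q, d)).2 ∧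
      (l.foldl (fun st p => if cellC arr p.1 p.2 = 'P'
          then (st.1 ++ [p], mset st.2 p.1 p.2 0) else st) (q, d)).1.Nodup ∧
      (∀ p, mget (l.foldl (fun st p => if cellC arr p.1 p.2 = 'P'
          then (st.1 ++ [p], mset st.2 p.1 p.2 0) else st) (q, d)).2 p.1 p.2 =
        if p ∈ (l.foldl (fun st p => if cellC arr p.1 p.2 = 'P'
          then (st.1 ++ [p], mset st.2 p.1 p.2 0) else st) (q, d)).1 then 0 else -1) ∧
      (∀ p, p ∈ (l.foldl (fun st p => if cellC arr p.1 p.2 = 'P'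
          then (st.1 ++ [p], mset st.2 p.1 p.2 0) else st) (q, d)).1 ↔
        (p ∈ q ∨ (p ∈ l ∧ cellC arr p.1 p.2 = 'P'))) := by
  intro l
  induction l with
  | nil =>
    intro q d hsh hqnd _ _ hm
    exact ⟨hsh, hqnd, hm, fun p => by simp⟩
  | cons p0 t ih =>
    intro q d hsh hqnd hlnd hmem hm
    have hin0 : inb n p0 := (hmem p0 List.mem_cons_self).1
    have hp0q : p0 ∉ q := (hmem p0 List.mem_cons_self).2
    have hp0t : p0 ∉ t := (List.nodup_cons.1 hlnd).1
    simp only [List.foldl_cons]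
    by_cases hP : cellC arr p0.1 p0.2 = 'P'
    · rw [if_pos hP]
      obtain ⟨r1, r2, r3, r4⟩ := ih (q ++ [p0]) (mset d p0.1 p0.2 0)
        (shapeN_mset hsh _ _ _)
        (List.Nodup.append hqnd (List.nodup_singleton _)
          (by intro x hx hx2; rw [List.mem_singleton] at hx2; subst hx2; exact hp0q hx))
        (List.nodup_cons.1 hlnd).2
        (by
          intro p hp
          refine ⟨(hmem p (List.mem_cons_of_mem _ hp)).1, ?_⟩
          rw [List.mem_append, List.mem_singleton]
          rintro (hq | rfl)
          · exact (hmem p (List.mem_cons_of_mem _ hp)).2 hq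
          · exact hp0t hp)
        (by
          intro p
          rw [mget_mset hsh hin0 0 p]
          by_cases hpq : p = p0
          · rw [if_pos hpq, if_pos (by rw [hpq]; exact List.mem_append_right _ (List.mem_singleton.2 rfl))]
          · rw [if_neg hpq, hm p]
            have : (p ∈ q ++ [p0]) ↔ p ∈ q := by
              rw [List.mem_append, List.mem_singleton]
              exact ⟨fun h => h.elim id (fun h' => absurd h' hpq), Or.inl⟩
            by_cases hpmem : p ∈ q
            · rw [if_pos hpmem, if_pos (this.2 hpmem)]
            · rw [if_neg hpmem, if_neg (fun h => hpmem (this.1 h))])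
      refine ⟨r1, r2, r3, ?_⟩
      intro p
      rw [r4 p, List.mem_append, List.mem_singleton, List.mem_cons]
      constructor
      · rintro ((hq | rfl) | ⟨ht, hc⟩)
        · exact Or.inl hq
        · exact Or.inr ⟨Or.inl rfl, hP⟩
        · exact Or.inr ⟨Or.inr ht, hc⟩
      · rintro (hq | ⟨(rfl | ht), hc⟩)
        · exact Or.inl (Or.inl hq)
        · exact Or.inl (Or.inr rfl)
        · exact Or.inr ⟨ht, hc⟩
    · rw [if_neg hP]
      obtain ⟨r1, r2, r3, r4⟩ := ih q d hsh hqnd (List.nodup_cons.1 hlnd).2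
        (fun p hp => hmem p (List.mem_cons_of_mem _ hp)) hm
      refine ⟨r1, r2, r3, ?_⟩
      intro p
      rw [r4 p, List.mem_cons]
      constructor
      · rintro (hq | ⟨ht, hc⟩)
        · exact Or.inl hq
        · exact Or.inr ⟨Or.inr ht, hc⟩
      · rintro (hq | ⟨(rfl | ht), hc⟩)
        · exact Or.inl hq
        · exact absurd hc hP
        · exact Or.inr ⟨ht, hc⟩


-- ---- B-side: matrices built by nested map comprehensions ----
theorem shape_build (n : Int) (g : Int → Int → Int) :
    shapeN n ((PySem.List.pyRange 0 n 1).map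
      (fun i => (PySem.List.pyRange 0 n 1).map (fun j => g i j))) := by
  constructor
  · rw [List.length_map, PySem.List.length_pyRange_one]
    simp
  · intro r hr
    rw [List.mem_map] at hr
    obtain ⟨i, -, rfl⟩ := hr
    rw [List.length_map, PySem.List.length_pyRange_one]
    simp

theorem mget_build (n : Int) (g : Int → Int → Int) {i j : Int} (h : inb n (i, j)) :
    mget ((PySem.List.pyRange 0 n 1).map
      (fun i => (PySem.List.pyRange 0 n 1).map (fun j => g i j))) i j = g i j := by
  obtain ⟨h1, h2, h3, h4⟩ := h
  simp only at h1 h2 h3 h4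
  have hgetD : ∀ {α : Type} (xs : List α) (t : Int) (d : α), 0 ≤ t →
      xs.getD t.toNat d = PySem.List.pyGetD xs t d := by
    intro α xs t d ht
    have he : PySem.List.pyGetD xs t d = PySem.List.pyGetD xs ((t.toNat : Nat) : Int) d := by
      congr 1
      omega
    rw [he, PySem.List.pyGetD_natCast]
  simp only [mget, if_pos (⟨h1, h3⟩ : (0:Int) ≤ i ∧ 0 ≤ j)]
  rw [hgetD _ i _ h1, PySem.List.pyGetD_map_pyRange_of_nonneg _ n i _ h1 h2,
    hgetD _ j _ h3, PySem.List.pyGetD_map_pyRange_of_nonneg _ n j _ h3 h4]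

-- ---- B-side: the inner minimisation fold of relaxB ----
def rbF (n : Int) (d : List (List Int)) (l : List (Int × Int)) (b0 : Int) : Int :=
  l.foldl (fun b q =>
    if 0 ≤ q.1 ∧ q.1 < n ∧ 0 ≤ q.2 ∧ q.2 < n ∧ mget d q.1 q.2 + 1 < b
    then mget d q.1 q.2 + 1 else b) b0

theorem rbF_cons (n : Int) (d : List (List Int)) (q : Int × Int) (t : List (Int × Int))
    (b0 : Int) : rbF n d (q :: t) b0 =
      rbF n d t (if 0 ≤ q.1 ∧ q.1 < n ∧ 0 ≤ q.2 ∧ q.2 < n ∧ mget d q.1 q.2 + 1 < b0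
        then mget d q.1 q.2 + 1 else b0) := rfl

theorem relaxB_eq {n : Int} {arr : List String} {d : List (List Int)} {i j : Int}
    (h : ¬ (cellC arr i j = 'X' ∨ cellC arr i j = 'P')) :
    relaxB n arr d i j = rbF n d (nbrsOf i j) (mget d i j) := by
  rw [relaxB, if_neg h]
  rfl

theorem rbF_le_init (n : Int) (d : List (List Int)) :
    ∀ (l : List (Int × Int)) (b0 : Int), rbF n d l b0 ≤ b0 := by
  intro l
  induction l with
  | nil => intro b0; exact le_refl _
  | cons q t ih =>
    intro b0
    rw [rbF_cons]
    split_ifs with h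
    · exact le_trans (ih _) (by omega)
    · exact ih b0

theorem rbF_le_mem (n : Int) (d : List (List Int)) :
    ∀ (l : List (Int × Int)) (b0 : Int) (q : Int × Int), q ∈ l → inb n q →
      rbF n d l b0 ≤ mget d q.1 q.2 + 1 := by
  intro l
  induction l with
  | nil => intro b0 q hq; exact absurd hq (List.not_mem_nil)
  | cons q' t ih =>
    intro b0 q hq hinb
    rcases List.mem_cons.1 hq with rfl | hq'
    · rw [rbF_cons]
      obtain ⟨g1, g2, g3, g4⟩ := hinb
      split_ifs with h
      · exact rbF_le_init n d t _
      · have : ¬ (mget d q.1 q.2 + 1 < b0) := by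
          intro hc
          exact h ⟨g1, g2, g3, g4, hc⟩
        exact le_trans (rbF_le_init n d t _) (by omega)
    · rw [rbF_cons]
      split_ifs with h
      · exact ih _ q hq' hinb
      · exact ih _ q hq' hinb

theorem rbF_lower (n : Int) (d : List (List Int)) :
    ∀ (l : List (Int × Int)) (b0 B : Int), B ≤ b0 →
      (∀ q ∈ l, inb n q → B ≤ mget d q.1 q.2 + 1) → B ≤ rbF n d l b0 := by
  intro l
  induction l with
  | nil => intro b0 B h _; exact h
  | cons q t ih =>
    intro b0 B h hq
    rw [rbF_cons]
    split_ifs with hg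
    · exact ih _ B (hq q List.mem_cons_self ⟨hg.1, hg.2.1, hg.2.2.1, hg.2.2.2.1⟩)
        (fun x hx => hq x (List.mem_cons_of_mem _ hx))
    · exact ih _ B h (fun x hx => hq x (List.mem_cons_of_mem _ hx))

theorem rbF_cases (n : Int) (d : List (List Int)) :
    ∀ (l : List (Int × Int)) (b0 : Int),
      rbF n d l b0 = b0 ∨ ∃ q ∈ l, inb n q ∧ rbF n d l b0 = mget d q.1 q.2 + 1 := by
  intro l
  induction l with
  | nil => intro b0; exact Or.inl rfl
  | cons q t ih =>
    intro b0
    rw [rbF_cons]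
    split_ifs with hg
    · rcases ih (mget d q.1 q.2 + 1) with h | ⟨q', hq', hin, hv⟩
      · exact Or.inr ⟨q, List.mem_cons_self, ⟨hg.1, hg.2.1, hg.2.2.1, hg.2.2.2.1⟩, h⟩
      · exact Or.inr ⟨q', List.mem_cons_of_mem _ hq', hin, hv⟩
    · rcases ih b0 with h | ⟨q', hq', hin, hv⟩
      · exact Or.inl h
      · exact Or.inr ⟨q', List.mem_cons_of_mem _ hq', hin, hv⟩

-- ---- B-side: neighbour lists vs adjacency ----
theorem nbrs_adj {i j : Int} {q : Int × Int} (h : q ∈ nbrsOf i j) : adj q (i, j) := by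
  simp only [nbrsOf, List.mem_cons, List.not_mem_nil, or_false] at h
  rcases h with rfl | rfl | rfl | rfl
  · exact ⟨(1, 0), by simp [dirs4], by simp⟩
  · exact ⟨(-1, 0), by simp [dirs4], by simp⟩
  · exact ⟨(0, 1), by simp [dirs4], by simp⟩
  · exact ⟨(0, -1), by simp [dirs4], by simp⟩

theorem adj_nbrs {i j : Int} {q : Int × Int} (h : adj q (i, j)) : q ∈ nbrsOf i j := by
  obtain ⟨dd, hdd, heq⟩ := h
  rw [Prod.ext_iff] at heq
  simp only at heq
  simp only [dirs4, List.mem_cons, List.not_mem_nil, or_false] at hdd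
  have hq : q = (q.1, q.2) := rfl
  rcases hdd with rfl | rfl | rfl | rfl <;>
    (simp only [nbrsOf, List.mem_cons, Prod.ext_iff]; simp at heq; omega)

-- ---- B-side: the sweep invariant ----
def Wb (n : Int) (arr : List String) (k : Nat) (m : List (List Int)) : Prop :=
  shapeN n m ∧
  (∀ p ∈ cells n, mget m p.1 p.2 = (Ncap n : Int) + 1 ∨
      (0 ≤ mget m p.1 p.2 ∧ mget m p.1 p.2 ≤ (Ncap n : Int) ∧
        reachR n arr (mget m p.1 p.2).toNat p = true)) ∧
  (∀ p, 0 ≤ lvlI n arr p → lvlI n arr p ≤ (k : Int) → mget m p.1 p.2 = lvlI n arr p)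

theorem val_ge_lvl {n : Int} {arr : List String} {m : List (List Int)} {p : Int × Int}
    (h : mget m p.1 p.2 = (Ncap n : Int) + 1 ∨
      (0 ≤ mget m p.1 p.2 ∧ mget m p.1 p.2 ≤ (Ncap n : Int) ∧
        reachR n arr (mget m p.1 p.2).toNat p = true)) :
    lvlI n arr p ≤ mget m p.1 p.2 := by
  rcases h with h | ⟨h1, h2, h3⟩
  · rcases lvl_cases n arr p with h' | ⟨-, h'⟩ <;> omega
  · have := lvl_le_of_reach h3 (by omega)
    omega

theorem mget_sweepB {n : Int} {arr : List String} {m : List (List Int)} {p : Int × Int}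
    (hp : p ∈ cells n) : mget (sweepB n arr m) p.1 p.2 = relaxB n arr m p.1 p.2 := by
  obtain ⟨i, j⟩ := p
  exact mget_build n _ ((mem_cells n _).1 hp)

theorem sweep_sim {n : Int} {arr : List String} {k : Nat} {m : List (List Int)}
    (hW : Wb n arr k m) : Wb n arr (k+1) (sweepB n arr m) := by
  obtain ⟨hsh, W2, W3⟩ := hW
  refine ⟨shape_build n _, ?_, ?_⟩
  · -- W2 preserved
    intro p hp
    rw [mget_sweepB hp]
    by_cases hXP : cellC arr p.1 p.2 = 'X' ∨ cellC arr p.1 p.2 = 'P'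
    · rw [relaxB, if_pos hXP]
      exact W2 p hp
    · rw [relaxB_eq hXP]
      have hfin : rbF n m (nbrsOf p.1 p.2) (mget m p.1 p.2) ≤ (Ncap n : Int) + 1 := by
        have h0 := rbF_le_init n m (nbrsOf p.1 p.2) (mget m p.1 p.2)
        rcases W2 p hp with h | ⟨-, h, -⟩ <;> omega
      rcases rbF_cases n m (nbrsOf p.1 p.2) (mget m p.1 p.2) with h | ⟨q, hq, hqin, hv⟩
      · rw [h]
        exact W2 p hp
      · have hqc : q ∈ cells n := (mem_cells n q).2 hqin
        rcases W2 q hqc with hq2 | ⟨hq0, hqcap, hqr⟩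
        · exfalso
          rw [hq2] at hv
          omega
        · have hpinb : inb n p := (mem_cells n p).1 hp
          have hX : cellC arr p.1 p.2 ≠ 'X' := fun hc => hXP (Or.inl hc)
          have hreach : reachR n arr ((mget m q.1 q.2).toNat + 1) p = true :=
            (reach_step_iff n arr _ p).2 (Or.inr ⟨hpinb, hX, q,
              (by obtain ⟨i, j⟩ := p; exact nbrs_adj hq), hqr⟩)
          by_cases hcap : mget m q.1 q.2 + 1 ≤ (Ncap n : Int)
          · refine Or.inr ⟨by omega, by omega, ?_⟩
            rw [hv, show (mget m q.1 q.2 + 1).toNat = (mget m q.1 q.2).toNat + 1 by omega]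
            exact hreach
          · left
            omega
  · -- W3 advances one level
    intro p h0 hk1
    have hinb : inb n p := lvl_inb (n := n) (arr := arr) (p := p) h0
    have hp : p ∈ cells n := (mem_cells n p).2 hinb
    rw [mget_sweepB hp]
    by_cases hX : cellC arr p.1 p.2 = 'X'
    · exfalso
      have := lvl_X (n := n) (arr := arr) (p := p) hX
      omega
    by_cases hP : cellC arr p.1 p.2 = 'P'
    · have hl0 : lvlI n arr p = 0 := (lvl_zero_iff n arr p).2 ⟨hinb, hP⟩
      rw [relaxB, if_pos (Or.inr hP), W3 p h0 (by omega)]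
    have hXP : ¬ (cellC arr p.1 p.2 = 'X' ∨ cellC arr p.1 p.2 = 'P') := by
      rintro (h | h) <;> [exact hX h; exact hP h]
    rw [relaxB_eq hXP]
    have hlower : lvlI n arr p ≤ rbF n m (nbrsOf p.1 p.2) (mget m p.1 p.2) := by
      refine rbF_lower n m _ _ _ (val_ge_lvl (W2 p hp)) ?_
      intro q hq hqin
      have hqc : q ∈ cells n := (mem_cells n q).2 hqin
      rcases W2 q hqc with hq2 | ⟨hq0, hqcap, hqr⟩
      · have := lvl_cases n arr p
        omega
      · have hlq := lvl_le_of_reach hqr (by omega)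
        have hadj : adj q p := by
          obtain ⟨i, j⟩ := p
          exact nbrs_adj hq
        rcases lvl_adj_bound hadj hinb hX hlq.1 with hb | hb
        · omega
        · have := lvl_cases n arr p
          omega
    have hupper : rbF n m (nbrsOf p.1 p.2) (mget m p.1 p.2) ≤ lvlI n arr p := by
      by_cases hle : lvlI n arr p ≤ (k : Int)
      · rw [← W3 p h0 hle]
        exact rbF_le_init n m _ _
      · have hlk1 : lvlI n arr p = (k : Int) + 1 := by push_cast at hk1; omega
        obtain ⟨-, -, q0, hadj, hq0⟩ := lvl_succ_backward hlk1
        have hq0in : inb n q0 := lvl_inb (n := n) (arr := arr) (p := q0) (by omega)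
        have hq0mem : q0 ∈ nbrsOf p.1 p.2 := by
          have : adj q0 (p.1, p.2) := by
            obtain ⟨i, j⟩ := p
            exact hadj
          exact adj_nbrs this
        have := rbF_le_mem n m (nbrsOf p.1 p.2) (mget m p.1 p.2) q0 hq0mem hq0in
        rw [W3 q0 (by omega) (by omega), hq0] at this
        omega
    omega

-- ---- B-side: a fixpoint of the sweep is fully converged ----
theorem fix_sim {n : Int} {arr : List String} {k : Nat} {m : List (List Int)}
    (hW : Wb n arr k m) (hfix : sweepB n arr m = m) :
    ∀ (j : Nat) (p : Int × Int), lvlI n arr p = (j : Int) → mget m p.1 p.2 = (j : Int) := by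
  obtain ⟨hsh, W2, W3⟩ := hW
  intro j
  induction j using Nat.strong_induction_on with
  | _ j ih =>
    intro p hl
    have h0 : 0 ≤ lvlI n arr p := by omega
    have hinb : inb n p := lvl_inb (n := n) (arr := arr) (p := p) h0
    have hp : p ∈ cells n := (mem_cells n p).2 hinb
    have hfixp : mget m p.1 p.2 = relaxB n arr m p.1 p.2 := by
      conv_lhs => rw [← hfix]
      exact mget_sweepB hp
    cases j with
    | zero =>
      have := W3 p h0 (by omega)
      omega
    | succ j' =>
      have hX : cellC arr p.1 p.2 ≠ 'X' := by
        intro hc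
        have := lvl_X (n := n) (arr := arr) (p := p) hc
        omega
      have hP : cellC arr p.1 p.2 ≠ 'P' := by
        intro hc
        have := (lvl_zero_iff n arr p).2 ⟨hinb, hc⟩
        omega
      have hXP : ¬ (cellC arr p.1 p.2 = 'X' ∨ cellC arr p.1 p.2 = 'P') := by
        rintro (h | h) <;> [exact hX h; exact hP h]
      rw [relaxB_eq hXP] at hfixp
      obtain ⟨-, -, q0, hadj, hq0⟩ := lvl_succ_backward (k := j') (by exact_mod_cast hl)
      have hq0v : mget m q0.1 q0.2 = (j' : Int) := ih j' (by omega) q0 hq0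
      have hq0in : inb n q0 := lvl_inb (n := n) (arr := arr) (p := q0) (by omega)
      have hq0mem : q0 ∈ nbrsOf p.1 p.2 := by
        have : adj q0 (p.1, p.2) := by
          obtain ⟨i, j⟩ := p
          exact hadj
        exact adj_nbrs this
      have hub := rbF_le_mem n m (nbrsOf p.1 p.2) (mget m p.1 p.2) q0 hq0mem hq0in
      have hlb := val_ge_lvl (n := n) (arr := arr) (W2 p hp)
      rw [hq0v] at hub
      push_cast
      omega

-- ---- B-side: the fuelled sweep loop ----
theorem jloop_sim {n : Int} {arr : List String} :
    ∀ (fuel k : Nat) (m : List (List Int)), Wb n arr k m → Ncap n ≤ k + fuel →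
      ∀ p ∈ cells n, mget (jloopB n arr fuel m) p.1 p.2 =
        (if lvlI n arr p = -1 then (Ncap n : Int) + 1 else lvlI n arr p) := by
  intro fuel
  induction fuel with
  | zero =>
    intro k m hW hcap p hp
    obtain ⟨hsh, W2, W3⟩ := hW
    show mget m p.1 p.2 = _
    split_ifs with hneg
    · rcases W2 p hp with h | ⟨h1, h2, h3⟩
      · exact h
      · exfalso
        have := lvl_le_of_reach h3 (by omega)
        omega
    · have h0 : 0 ≤ lvlI n arr p := by
        have := lvl_ge_neg n arr p
        omega
      refine W3 p h0 ?_
      have := lvl_cases n arr p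
      omega
  | succ f ihf =>
    intro k m hW hcap p hp
    show mget (if sweepB n arr m = m then m else jloopB n arr f (sweepB n arr m)) p.1 p.2 = _
    by_cases hfix : sweepB n arr m = m
    · rw [if_pos hfix]
      by_cases hneg : lvlI n arr p = -1
      · rw [if_pos hneg]
        obtain ⟨hsh, W2, W3⟩ := hW
        rcases W2 p hp with h | ⟨h1, h2, h3⟩
        · exact h
        · exfalso
          have := lvl_le_of_reach h3 (by omega)
          omega
      · rw [if_neg hneg]
        have h0 : 0 ≤ lvlI n arr p := by
          have := lvl_ge_neg n arr p
          omega
        have hcast : lvlI n arr p = ((lvlI n arr p).toNat : Int) := by omega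
        rw [hcast]
        exact fix_sim hW hfix (lvlI n arr p).toNat p hcast
    · rw [if_neg hfix]
      exact ihf (k+1) (sweepB n arr m) (sweep_sim hW) (by omega) p hp


-- ---- casts between Ncap and n*n ----
theorem Ncap_cast {n : Int} (hn : 0 ≤ n) : ((Ncap n : Nat) : Int) = n * n := by
  unfold Ncap
  push_cast
  rw [Int.toNat_of_nonneg hn]

theorem toNat_mul_self {n : Int} (hn : 0 ≤ n) : (n * n).toNat = Ncap n := by
  have h := (Ncap_cast hn).symm
  rw [h, Int.toNat_natCast]

-- ---- B-side: the initial matrix satisfies the invariant at level 0 ----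
theorem init_W {n : Int} {arr : List String} (hn : 0 ≤ n) :
    Wb n arr 0 ((PySem.List.pyRange 0 n 1).map (fun i =>
      (PySem.List.pyRange 0 n 1).map (fun j => if cellC arr i j = 'P' then 0 else n * n + 1))) := by
  have hNc := Ncap_cast hn
  refine ⟨shape_build n _, ?_, ?_⟩
  · intro p hp
    have hinb := (mem_cells n p).1 hp
    have hm : mget ((PySem.List.pyRange 0 n 1).map (fun i =>
        (PySem.List.pyRange 0 n 1).map (fun j => if cellC arr i j = 'P' then 0 else n * n + 1)))
        p.1 p.2 = if cellC arr p.1 p.2 = 'P' then 0 else n * n + 1 := by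
      obtain ⟨i, j⟩ := p
      exact mget_build n _ hinb
    rw [hm]
    by_cases hP : cellC arr p.1 p.2 = 'P'
    · rw [if_pos hP]
      refine Or.inr ⟨le_refl 0, by positivity, ?_⟩
      rw [show ((0:Int)).toNat = 0 from rfl]
      exact (reach_zero_iff n arr p).2 ⟨hinb, hP⟩
    · rw [if_neg hP]
      left
      omega
  · intro p h0 hk
    have hl0 : lvlI n arr p = 0 := by omega
    obtain ⟨hinb, hP⟩ := (lvl_zero_iff n arr p).1 hl0
    have hm : mget ((PySem.List.pyRange 0 n 1).map (fun i =>
        (PySem.List.pyRange 0 n 1).map (fun j => if cellC arr i j = 'P' then 0 else n * n + 1)))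
        p.1 p.2 = if cellC arr p.1 p.2 = 'P' then 0 else n * n + 1 := by
      obtain ⟨i, j⟩ := p
      exact mget_build n _ hinb
    rw [hm, if_pos hP, hl0]

-- ---- the two final scans agree pointwise ----
theorem scan_eq {n : Int} {arr : List String} (hn : 0 ≤ n) (dA dB : List (List Int))
    (hA : ∀ p, mget dA p.1 p.2 = lvlI n arr p)
    (hB : ∀ p ∈ cells n, mget dB p.1 p.2 =
        if lvlI n arr p = -1 then (Ncap n : Int) + 1 else lvlI n arr p) :
    ∀ (l : List (Int × Int)), (∀ p ∈ l, p ∈ cells n) → ∀ (acc : Int), -1 ≤ acc →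
      l.foldl (fun m p => if cellC arr p.1 p.2 = 'O'
          then (if m < mget dA p.1 p.2 then mget dA p.1 p.2 else m) else m) acc =
      l.foldl (fun m p => if cellC arr p.1 p.2 = 'O' ∧ mget dB p.1 p.2 < n * n + 1 ∧
          m < mget dB p.1 p.2 then mget dB p.1 p.2 else m) acc := by
  have hNc := Ncap_cast hn
  intro l
  induction l with
  | nil => intro _ acc _; rfl
  | cons p t ih =>
    intro hmem acc hacc
    simp only [List.foldl_cons]
    have hpc := hmem p List.mem_cons_self
    have hBv := hB p hpc
    have hAv := hA p
    have hcases := lvl_cases n arr p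
    have htail := fun q hq => hmem q (List.mem_cons_of_mem _ hq)
    by_cases hO : cellC arr p.1 p.2 = 'O'
    · by_cases hneg : lvlI n arr p = -1
      · have e1 : (if acc < mget dA p.1 p.2 then mget dA p.1 p.2 else acc) = acc := by
          rw [hAv, hneg, if_neg (by omega)]
        have e2 : ¬ (cellC arr p.1 p.2 = 'O' ∧ mget dB p.1 p.2 < n * n + 1 ∧
            acc < mget dB p.1 p.2) := by
          rw [hBv, if_pos hneg]
          rintro ⟨-, hlt, -⟩
          omega
        rw [if_pos hO, e1, if_neg e2]
        exact ih htail acc hacc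
      · have h0 : 0 ≤ lvlI n arr p := by
          have := lvl_ge_neg n arr p
          omega
        have hcap : lvlI n arr p ≤ (Ncap n : Int) := by omega
        by_cases hlt : acc < lvlI n arr p
        · rw [if_pos hO, hAv, if_pos hlt,
            if_pos (⟨hO, by rw [hBv, if_neg hneg]; omega,
              by rw [hBv, if_neg hneg]; exact hlt⟩ :
              cellC arr p.1 p.2 = 'O' ∧ mget dB p.1 p.2 < n * n + 1 ∧ acc < mget dB p.1 p.2),
            hBv, if_neg hneg]
          exact ih htail _ (by omega)
        · rw [if_pos hO, hAv, if_neg hlt,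
            if_neg (by rw [hBv, if_neg hneg]; rintro ⟨-, -, hc⟩; exact hlt hc)]
          exact ih htail acc hacc
    · rw [if_neg hO, if_neg (by rintro ⟨hc, -⟩; exact hO hc)]
      exact ih htail acc hacc

-- ===== VERDICT (by name: the statement is the Claim_ definition above) =====
theorem bfs_spec : Claim_equal_bfs := by
  unfold Claim_equal_bfs
  intro n arr _ _
  unfold Spec_bfs
  show bfs n arr = bfs_alt n arr
  by_cases hn : 0 ≤ n
  · -- main case
    simp only [bfs, bfs_alt]
    rw [nestedFold n (fun st i j => if cellC arr i j = 'P'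
        then (st.1 ++ [(i, j)], mset st.2 i j 0) else st)
        ([], List.replicate n.toNat (List.replicate n.toNat (-1)))]
    obtain ⟨e1, e2, e3, e4⟩ := seedFold (n := n) (arr := arr) (cells n) []
      (List.replicate n.toNat (List.replicate n.toNat (-1)))
      (shapeN_replicate n) List.nodup_nil (nodup_cells n)
      (fun p hp => ⟨(mem_cells n p).1 hp, List.not_mem_nil⟩)
      (fun p => by rw [mget_replicate n p, if_neg (List.not_mem_nil)])
    set SA := (cells n).foldl (fun st (p : Int × Int) => if cellC arr p.1 p.2 = 'P'
        then (st.1 ++ [(p.1, p.2)], mset st.2 p.1 p.2 0) else st)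
        (([], List.replicate n.toNat (List.replicate n.toNat (-1))) :
          List (Int × Int) × List (List Int)) with hSAdef
    have hmem0 : ∀ p, p ∈ SA.1 ↔ lvlI n arr p = 0 := by
      intro p
      rw [show SA.1 = ((cells n).foldl (fun st (p : Int × Int) => if cellC arr p.1 p.2 = 'P'
        then (st.1 ++ [p], mset st.2 p.1 p.2 0) else st)
        ([], List.replicate n.toNat (List.replicate n.toNat (-1)))).1 from rfl, e4 p,
        lvl_zero_iff n arr p]
      constructor
      · rintro (h | ⟨hc, hP⟩)
        · exact absurd h (List.not_mem_nil)
        · exact ⟨(mem_cells n p).1 hc, hP⟩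
      · rintro ⟨hinb, hP⟩
        exact Or.inr ⟨(mem_cells n p).2 hinb, hP⟩
    have hE3 : ∀ p, mget SA.2 p.1 p.2 = if p ∈ SA.1 then 0 else -1 := e3
    have H30 : ∀ p, mget SA.2 p.1 p.2 =
        if 0 ≤ lvlI n arr p ∧ lvlI n arr p ≤ ((0 : Nat) : Int) then lvlI n arr p else -1 := by
      intro p
      rw [hE3 p]
      by_cases hp : p ∈ SA.1
      · have := (hmem0 p).1 hp
        rw [if_pos hp, if_pos (by omega), this]
      · have hne : lvlI n arr p ≠ 0 := fun hc => hp ((hmem0 p).2 hc)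
        rw [if_neg hp, if_neg (by push_cast; omega)]
    have hcount : cneg n SA.2 + SA.1.length = Ncap n := by
      have h := countP_sub SA.1 (cells n) (fun _ => true)
        (fun p => mget SA.2 p.1 p.2 == -1) (nodup_cells n) e2
        (fun p hp => (mem_cells n p).2 (lvl_inb (n := n) (arr := arr) (p := p)
          (by rw [(hmem0 p).1 hp])))
        (fun p _ => rfl)
        (fun p hp => by
          show (mget SA.2 p.1 p.2 == -1) = false
          rw [hE3 p, if_pos hp]
          rfl)
        (fun p _ hp => by
          show (mget SA.2 p.1 p.2 == -1) = true
          rw [hE3 p, if_neg hp]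
          rfl)
      rw [List.countP_true, length_cells] at h
      exact h
    have hDA : ∀ p, mget (loopA n arr (n.toNat * n.toNat) SA.1 SA.2) p.1 p.2 =
        lvlI n arr p := by
      refine loopSim (n.toNat * n.toNat) 0 SA.2 SA.1 e1 H30
        (fun p => by rw [hmem0 p]; push_cast; rfl) e2 (by unfold Ncap at hcount; omega) ?_
      intro hne
      have := List.length_pos_of_ne_nil hne
      omega
    rw [nestedFold n (fun m i j => if cellC arr i j = 'O'
        then (if m < mget (loopA n arr (n.toNat * n.toNat) SA.1 SA.2) i j
          then mget (loopA n arr (n.toNat * n.toNat) SA.1 SA.2) i j else m) else m) (-1),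
      nestedFold n (fun m i j => if cellC arr i j = 'O' ∧
          mget (jloopB n arr (n * n).toNat ((PySem.List.pyRange 0 n 1).map (fun i =>
            (PySem.List.pyRange 0 n 1).map (fun j =>
              if cellC arr i j = 'P' then 0 else n * n + 1)))) i j < n * n + 1 ∧
          m < mget (jloopB n arr (n * n).toNat ((PySem.List.pyRange 0 n 1).map (fun i =>
            (PySem.List.pyRange 0 n 1).map (fun j =>
              if cellC arr i j = 'P' then 0 else n * n + 1)))) i j
        then mget (jloopB n arr (n * n).toNat ((PySem.List.pyRange 0 n 1).map (fun i =>
            (PySem.List.pyRange 0 n 1).map (fun j =>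
              if cellC arr i j = 'P' then 0 else n * n + 1)))) i j else m) (-1)]
    have hdf := jloop_sim (n := n) (arr := arr) (n * n).toNat 0
      ((PySem.List.pyRange 0 n 1).map (fun i => (PySem.List.pyRange 0 n 1).map (fun j =>
        if cellC arr i j = 'P' then 0 else n * n + 1)))
      (init_W hn) (by rw [toNat_mul_self hn]; omega)
    exact scan_eq hn _ _ hDA hdf (cells n) (fun p hp => hp) (-1) (le_refl _)
  · -- degenerate case n < 0: the grid is empty, both programs return -1
    have hnil : PySem.List.pyRange 0 n 1 = [] := PySem.List.pyRange_one_eq_nil (by omega)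
    simp [bfs, bfs_alt, hnil, loopA_nil]
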